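-- pv_equiv track=rewrite | github.com/tyehle/speakdata | src/speakdata/speakdata.py | pronounce
-- ===== SOURCE A (Python) =====
-- _VOWELS = ["a", "i", "u", "oi", "ai", "ow", "ey", "or"]  # 3 bits
--
-- _CONSONANTS = "bfjklnst"  # 3 bits
--
-- def convert_u16(data: int) -> str:
--     """Convert a 16 bit unsigned number into a word."""
--     if data < 0 or data >= 2 ** 16:
--         raise ValueError(f"Not a u16: {data}")
--
--     # get the 16th bit by maybe adding *ing
--     #  c    v    c    v    c  ing?
--     # ...  ...  ...  ...  ...  .
--     # total 16 bits
--
--     return (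
--         _CONSONANTS[data >> 13 & 7]
--         + _VOWELS[data >> 10 & 7]
--         + _CONSONANTS[data >> 7 & 7]
--         + _VOWELS[data >> 4 & 7]
--         + _CONSONANTS[data >> 1 & 7]
--         + ("ing" if data & 1 == 1 else "")
--     )
--
-- def pronounce(data: bytes) -> str:
--     """Convert a byte sequence into a string.
--
--     Every two bytes becomes a word, and every 8 words becomes a sentence. If
--     there are an odd number of bytes then a zero byte fills out the last word.
--
--     Example:
--         >>> speakdata.pronounce([192, 168, 0, 1])
--         'Saful bababing.'
--
--     Args:
--         data: A byte sequence to pronounce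
--
--     Returns:
--         A pronouncable string representing the the given bytes
--     """
--     if not data:
--         return ""
--
--     result = []
--     sentence = []
--     partial = []
--     for byte in data:
--         partial.append(byte)
--         if len(partial) == 2:
--             number = (partial[0] << 8) + partial[1]
--             sentence.append(convert_u16(number))
--             partial = []
--             if len(sentence) == 8:
--                 result.append(" ".join(sentence).capitalize())
--                 sentence = []
--     if partial:
--         sentence.append(convert_u16(partial[0] << 8))
--     if sentence:
--         result.append(" ".join(sentence).capitalize())
--     return ". ".join(result) + "."
-- ===== SOURCE B (Python) =====
-- _VOWELS = ["a", "i", "u", "oi", "ai", "ow", "ey", "or"]  # 3 bits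
--
-- _CONSONANTS = "bfjklnst"  # 3 bits
--
-- def convert_u16(data: int) -> str:
--     """Convert a 16 bit unsigned number into a word."""
--     if data < 0 or data >= 2 ** 16:
--         raise ValueError(f"Not a u16: {data}")
--     return (
--         _CONSONANTS[data >> 13 & 7]
--         + _VOWELS[data >> 10 & 7]
--         + _CONSONANTS[data >> 7 & 7]
--         + _VOWELS[data >> 4 & 7]
--         + _CONSONANTS[data >> 1 & 7]
--         + ("ing" if data & 1 == 1 else "")
--     )
--
-- def pronounce(data: bytes) -> str:
--     """Convert a byte sequence into a string (see A's docstring).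
--
--     Three separate passes instead of one interleaved state machine:
--     pad to even length, turn byte pairs into words, then group words
--     into sentences of eight.
--     """
--     if not data:
--         return ""
--     rest = list(data) + [0] * (len(data) % 2)
--     words = []
--     while rest:
--         words.append(convert_u16((rest[0] << 8) + rest[1]))
--         rest = rest[2:]
--     sentences = []
--     groups = words
--     while groups:
--         sentences.append(" ".join(groups[:8]).capitalize())
--         groups = groups[8:]
--     return ". ".join(sentences) + "."
-- ===== Notes on version B (the rewrite author's own statement) =====
-- stated objective: simpler
-- what changed: Replaces A's single interleaved loop with its partial/sentence/result state machine by three separate passes: pad to even length, map byte pairs to words, then chunk the word list into sentences of eight.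
import Mathlib
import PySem

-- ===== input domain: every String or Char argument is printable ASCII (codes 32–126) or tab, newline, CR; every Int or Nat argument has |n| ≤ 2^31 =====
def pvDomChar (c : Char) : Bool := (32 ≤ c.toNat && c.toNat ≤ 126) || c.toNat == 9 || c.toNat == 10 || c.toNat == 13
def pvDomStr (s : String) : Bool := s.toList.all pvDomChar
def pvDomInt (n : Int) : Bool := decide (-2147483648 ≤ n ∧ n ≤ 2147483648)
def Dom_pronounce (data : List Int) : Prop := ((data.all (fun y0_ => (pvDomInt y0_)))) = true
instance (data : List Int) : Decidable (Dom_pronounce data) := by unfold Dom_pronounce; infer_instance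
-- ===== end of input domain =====

-- B replaces A's interleaved state-machine loop by three separate passes (pad, pair→word, chunk into
-- sentences of eight); same return value on every input where A returns (Pre_ excludes A's ValueError).

-- ===== PORT A =====
-- shared vocabulary of both Pythons (same-module constants)
def pvVOWELS : List (List Char) :=
  [['a'], ['i'], ['u'], ['o','i'], ['a','i'], ['o','w'], ['e','y'], ['o','r']]
def pvCONSONANTS : List Char := ['b', 'f', 'j', 'k', 'l', 'n', 's', 't']

-- convert_u16 (helper of both Pythons).  'x >> k & 7' is ported as (x >>> k) & 7 via PySem.Int.band
-- (exact for every int); the resulting index is always in [0,8), so the Python indexing never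
-- raises and List.getD is exact.  (Python's explicit 'raise ValueError' for non-u16 input is
-- excluded by Pre_pronounce.)
def convert_u16 (d : Int) : List Char :=
  [pvCONSONANTS.getD (PySem.Int.band (d >>> (13:Nat)) 7).toNat ' ']
  ++ pvVOWELS.getD (PySem.Int.band (d >>> (10:Nat)) 7).toNat []
  ++ [pvCONSONANTS.getD (PySem.Int.band (d >>> (7:Nat)) 7).toNat ' ']
  ++ pvVOWELS.getD (PySem.Int.band (d >>> (4:Nat)) 7).toNat []
  ++ [pvCONSONANTS.getD (PySem.Int.band (d >>> (1:Nat)) 7).toNat ' ']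
  ++ (if PySem.Int.band d 1 = 1 then ['i','n','g'] else [])

-- str.capitalize(): upper-case the first character, lower-case the rest (exact on ASCII)
def capWord (cs : List Char) : List Char :=
  match cs with
  | [] => []
  | c :: t => PySem.Chars.upperChar c :: PySem.Chars.lower t

-- A's loop body: state (result, sentence, partial)
def stepA (st : List (List Char) × List (List Char) × List Int) (byte : Int) :
    List (List Char) × List (List Char) × List Int :=
  let part := st.2.2 ++ [byte]
  if part.length = 2 then
    let number := (part.getD 0 0) <<< (8:Nat) + part.getD 1 0
    let sent := st.2.1 ++ [convert_u16 number]
    if sent.length = 8 then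
      (st.1 ++ [capWord (PySem.Chars.join [' '] sent)], [], [])
    else
      (st.1, sent, [])
  else
    (st.1, st.2.1, part)

def pronounce (data : List Int) : String :=
  if data = [] then "" else
    let st := data.foldl stepA ([], [], [])
    let st2 :=
      if st.2.2 ≠ [] then (st.1, st.2.1 ++ [convert_u16 ((st.2.2.getD 0 0) <<< (8:Nat))])
      else (st.1, st.2.1)
    let res := if st2.2 ≠ [] then st2.1 ++ [capWord (PySem.Chars.join [' '] st2.2)] else st2.1
    String.ofList (PySem.Chars.join ['.', ' '] res ++ ['.'])

-- ===== PORT B =====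
-- 'while rest: words.append(convert_u16((rest[0] << 8) + rest[1])); rest = rest[2:]'
-- (rest always has even length, so the one-element case is unreachable)
def pairWords : List Int → List (List Char)
  | a :: b :: r => convert_u16 (a <<< (8:Nat) + b) :: pairWords r
  | _ => []

-- 'while groups: sentences.append(" ".join(groups[:8]).capitalize()); groups = groups[8:]'
def groupSents (ws : List (List Char)) : List (List Char) :=
  if h : ws = [] then [] else
    capWord (PySem.Chars.join [' '] (ws.take 8)) :: groupSents (ws.drop 8)
termination_by ws.length
decreasing_by
  cases ws with
  | nil => exact absurd rfl h
  | cons x t => simp only [List.length_drop, List.length_cons]; omega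

def pronounce_alt (data : List Int) : String :=
  if data = [] then "" else
    let padded := data ++ List.replicate (data.length % 2) 0
    String.ofList (PySem.Chars.join ['.', ' '] (groupSents (pairWords padded)) ++ ['.'])

-- ===== PRECONDITION & SPEC =====
-- exactly the inputs on which the Python A returns: every 16-bit group (data[2i] << 8) + data[2i+1],
-- with a trailing zero byte on odd length, is a u16 — otherwise convert_u16 raises ValueError
def Pre_pronounce (data : List Int) : Prop :=
  ∀ i ∈ List.range ((data.length + 1) / 2),
    0 ≤ (data.getD (2*i) 0) <<< (8:Nat) + data.getD (2*i+1) 0 ∧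
    (data.getD (2*i) 0) <<< (8:Nat) + data.getD (2*i+1) 0 < 65536
instance (data : List Int) : Decidable (Pre_pronounce data) := by
  unfold Pre_pronounce; infer_instance

def pvWitness_pronounce : List Int := [192, 168, 0, 1]

def Spec_pronounce (data : List Int) (out : String) : Prop := out = pronounce_alt data
instance (data : List Int) (out : String) : Decidable (Spec_pronounce data out) := by
  unfold Spec_pronounce; infer_instance

-- ===== CLAIM (what is proved, stated in full; the proofs are below) =====
def Claim_equal_pronounce : Prop :=
  ∀ (data : List Int), Dom_pronounce data → Pre_pronounce data →
    Spec_pronounce data (pronounce data)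

-- ===== LEMMAS AND PROOFS =====

-- proof-side view of A's inner flush on one whole word
def stepW (p : List (List Char) × List (List Char)) (w : List Char) :
    List (List Char) × List (List Char) :=
  if (p.2 ++ [w]).length = 8 then (p.1 ++ [capWord (PySem.Chars.join [' '] (p.2 ++ [w]))], [])
  else (p.1, p.2 ++ [w])

-- A's trailing 'if partial: sentence.append(convert_u16(partial[0] << 8))'
def afterPartial (st : List (List Char) × List (List Char) × List Int) :
    List (List Char) × List (List Char) :=
  if st.2.2 ≠ [] then (st.1, st.2.1 ++ [convert_u16 ((st.2.2.getD 0 0) <<< (8:Nat))])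
  else (st.1, st.2.1)

-- A's final 'if sentence: result.append(" ".join(sentence).capitalize())'
def finalize (p : List (List Char) × List (List Char)) : List (List Char) :=
  if p.2 ≠ [] then p.1 ++ [capWord (PySem.Chars.join [' '] p.2)] else p.1

-- skeleton of B's two-bytes-at-a-time traversal, for functional induction only
def pairRec : List Int → Unit
  | _ :: _ :: r => pairRec r
  | _ => ()

theorem foldW_small : ∀ (chunk : List (List Char)) (res sent : List (List Char)),
    sent.length + chunk.length < 8 →
    List.foldl stepW (res, sent) chunk = (res, sent ++ chunk) := by
  intro chunk
  induction chunk with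
  | nil => intro res sent _; simp
  | cons w t ih =>
    intro res sent h
    simp only [List.length_cons] at h
    have hw : stepW (res, sent) w = (res, sent ++ [w]) := by
      unfold stepW
      rw [if_neg (by simp only [List.length_append, List.length_cons, List.length_nil]; omega)]
    have hrec := ih res (sent ++ [w])
      (by simp only [List.length_append, List.length_cons, List.length_nil]; omega)
    rw [List.foldl_cons, hw, hrec]
    simp

theorem foldW_full : ∀ (chunk : List (List Char)) (res sent : List (List Char)),
    chunk ≠ [] → sent.length + chunk.length = 8 →
    List.foldl stepW (res, sent) chunk
      = (res ++ [capWord (PySem.Chars.join [' '] (sent ++ chunk))], []) := by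
  intro chunk
  induction chunk with
  | nil => intro _ _ h _; exact absurd rfl h
  | cons w t ih =>
    intro res sent _ h
    simp only [List.length_cons] at h
    cases t with
    | nil =>
      simp only [List.length_nil] at h
      have hw : stepW (res, sent) w
          = (res ++ [capWord (PySem.Chars.join [' '] (sent ++ [w]))], []) := by
        unfold stepW
        rw [if_pos (by simp only [List.length_append, List.length_cons, List.length_nil]; omega)]
      simp [hw]
    | cons w2 t2 =>
      simp only [List.length_cons] at h
      have hw : stepW (res, sent) w = (res, sent ++ [w]) := by
        unfold stepW
        rw [if_neg (by simp only [List.length_append, List.length_cons, List.length_nil]; omega)]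
      have hrec := ih res (sent ++ [w]) (by simp)
        (by simp only [List.length_append, List.length_cons, List.length_nil]; omega)
      rw [List.foldl_cons, hw, hrec]
      simp

theorem foldW_groups : ∀ (ws : List (List Char)) (res : List (List Char)),
    finalize (List.foldl stepW (res, []) ws) = res ++ groupSents ws := by
  intro ws
  induction ws using groupSents.induct with
  | case1 => intro res; simp [finalize, groupSents]
  | case2 ws hne ih =>
    intro res
    rw [groupSents, dif_neg hne]
    by_cases hlen : ws.length < 8
    · have htake : ws.take 8 = ws := List.take_of_length_le (by omega)
      have hdrop : ws.drop 8 = [] := List.drop_eq_nil_of_le (by omega)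
      rw [foldW_small ws res [] (by simpa using hlen)]
      simp [finalize, hne, htake, hdrop, groupSents]
    · conv_lhs => rw [← List.take_append_drop 8 ws, List.foldl_append]
      rw [foldW_full (ws.take 8) res [] (by simp; omega) (by simp; omega), ih]
      simp

-- A's byte loop (with the trailing-partial fixup) seen through finalize equals the
-- word-level flush loop over the padded pair words.
theorem foldA_eq : ∀ (data : List Int) (res sent : List (List Char)), sent.length < 8 →
    finalize (afterPartial (List.foldl stepA (res, sent, []) data))
      = finalize (List.foldl stepW (res, sent)
          (pairWords (data ++ List.replicate (data.length % 2) 0))) := by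
  intro data
  induction data using pairRec.induct with
  | case2 x =>
    cases x with
    | nil => intro res sent _; simp [pairWords, afterPartial]
    | cons a t =>
      cases t with
      | cons b r => intro res sent _; simp at *
      | nil =>
        intro res sent _
        have e0 : a <<< (8:Nat) + 0 = a <<< (8:Nat) := by ring
        have hp : pairWords ([a] ++ List.replicate ([a].length % 2) 0)
            = [convert_u16 (a <<< (8:Nat))] := by
          simp [pairWords, e0]
        rw [hp]
        by_cases hc : sent.length = 7
        · simp [stepA, afterPartial, stepW, finalize, hc]
        · simp [stepA, afterPartial, stepW, finalize, hc]
  | case1 a b r ih =>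
    intro res sent hs
    have hmod : (a :: b :: r).length % 2 = r.length % 2 := by
      simp only [List.length_cons]; omega
    rw [hmod]
    have hpad : (a :: b :: r) ++ List.replicate (r.length % 2) 0
        = a :: b :: (r ++ List.replicate (r.length % 2) 0) := by simp
    rw [hpad]
    rw [show pairWords (a :: b :: (r ++ List.replicate (r.length % 2) 0))
        = convert_u16 (a <<< (8:Nat) + b) :: pairWords (r ++ List.replicate (r.length % 2) 0)
        from rfl]
    have hA : stepA (stepA (res, sent, []) a) b
        = ((stepW (res, sent) (convert_u16 (a <<< (8:Nat) + b))).1,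
           (stepW (res, sent) (convert_u16 (a <<< (8:Nat) + b))).2, ([] : List Int)) := by
      by_cases hc : sent.length = 7
      · simp [stepA, stepW, hc]
      · simp [stepA, stepW, hc]
    rw [List.foldl_cons, List.foldl_cons, List.foldl_cons, hA]
    rcases h : stepW (res, sent) (convert_u16 (a <<< (8:Nat) + b)) with ⟨res', sent'⟩
    have hlen : sent'.length < 8 := by
      unfold stepW at h
      split_ifs at h with hf
      · cases h; simp
      · cases h
        simp only [List.length_append, List.length_cons, List.length_nil] at hf ⊢
        omega
    exact ih res' sent' hlen

-- ===== VERDICT (by name: the statement is the Claim_ definition above) =====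
theorem pronounce_spec : Claim_equal_pronounce := by
  intro data _ _
  unfold Spec_pronounce pronounce pronounce_alt
  by_cases hd : data = []
  · simp [hd]
  · rw [if_neg hd, if_neg hd]
    show String.ofList (PySem.Chars.join ['.', ' ']
        (finalize (afterPartial (List.foldl stepA ([], [], []) data))) ++ ['.']) = _
    rw [foldA_eq data [] [] (by simp),
        foldW_groups (pairWords (data ++ List.replicate (data.length % 2) 0)) []]
    rfl
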